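-- pv_equiv track=rewrite | github.com/AMITESHWARNARAYAN/YOLO_RAOD | organize_dataset.py | get_image_class
-- ===== SOURCE A (Python) =====
-- CLASS_MAPPING = {
--     "pothole": "Pothole",
--     "alligator crack": "Severe_Damage",  # Alligator cracks are severe
--     "longitudinal crack": "Crack",
--     "lateral crack": "Crack",
--     # Images with no defects will be labeled as "Good"
-- }
--
-- def get_image_class(ann_data):
--     """
--     Determine the class of an image based on its annotations.
--     Priority: Pothole > Severe_Damage > Crack > Minor_Damage > Good
--     """
--     if not ann_data.get("objects"):
--         return "Good"
--
--     detected_classes = set()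
--     for obj in ann_data["objects"]:
--         class_title = obj.get("classTitle", "")
--         if class_title in CLASS_MAPPING:
--             detected_classes.add(CLASS_MAPPING[class_title])
--
--     # Priority-based class selection
--     if "Pothole" in detected_classes:
--         return "Pothole"
--     elif "Severe_Damage" in detected_classes:
--         return "Severe_Damage"
--     elif "Crack" in detected_classes:
--         return "Crack"
--     elif "Minor_Damage" in detected_classes:
--         return "Minor_Damage"
--     else:
--         return "Good"
-- ===== SOURCE B (Python) =====
-- CLASS_MAPPING = {
--     "pothole": "Pothole",
--     "alligator crack": "Severe_Damage",  # Alligator cracks are severe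
--     "longitudinal crack": "Crack",
--     "lateral crack": "Crack",
-- }
--
-- PRIORITY = ["Pothole", "Severe_Damage", "Crack"]
--
-- def get_image_class(ann_data):
--     """Priority-first scan: return the highest-priority class any object maps to."""
--     objs = ann_data.get("objects") or []
--     for cls in PRIORITY:
--         if any(CLASS_MAPPING.get(obj.get("classTitle", "")) == cls for obj in objs):
--             return cls
--     return "Good"
-- ===== Notes on version B (the rewrite author's own statement) =====
-- stated objective: simpler
-- what changed: Replaced A's collect-into-a-set pass plus a five-way membership cascade by a priority-first scan: loop over the ordered priority classes and return the first one some object maps to (the unreachable Minor_Damage branch and the empty-objects guard disappear).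
import Mathlib
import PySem

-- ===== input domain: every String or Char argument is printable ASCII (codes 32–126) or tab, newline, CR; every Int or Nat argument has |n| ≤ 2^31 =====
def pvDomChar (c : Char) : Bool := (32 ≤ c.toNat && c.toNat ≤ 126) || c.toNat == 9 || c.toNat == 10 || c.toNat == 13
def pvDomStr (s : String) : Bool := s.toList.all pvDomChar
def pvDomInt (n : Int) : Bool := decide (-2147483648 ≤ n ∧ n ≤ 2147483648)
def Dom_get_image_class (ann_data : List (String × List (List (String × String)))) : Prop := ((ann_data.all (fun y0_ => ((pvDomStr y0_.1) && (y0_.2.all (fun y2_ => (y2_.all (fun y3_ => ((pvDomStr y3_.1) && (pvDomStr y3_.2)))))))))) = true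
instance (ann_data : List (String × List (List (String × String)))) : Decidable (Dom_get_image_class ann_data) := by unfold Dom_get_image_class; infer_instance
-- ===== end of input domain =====

-- B replaces A's collect-then-cascade (set of mapped classes, then a five-way membership
-- chain) by a simpler priority-first scan over the ordered priority classes.

-- shared module constant CLASS_MAPPING
def pvClassMapping : PySem.Dict String String :=
  PySem.Dict.mk [("pothole", "Pothole"),
   ("alligator crack", "Severe_Damage"),
   ("longitudinal crack", "Crack"),
   ("lateral crack", "Crack")]

-- ===== PORT A =====
def get_image_class (ann_data : List (String × List (List (String × String)))) : String :=
  let objs := (PySem.Dict.get? (PySem.Dict.mk ann_data) "objects").getD []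
  if objs = [] then "Good"
  else
    let detected := objs.foldl (fun s obj =>
      let class_title := PySem.Dict.getD (PySem.Dict.mk obj) "classTitle" ""
      match PySem.Dict.get? pvClassMapping class_title with
      | some v => PySem.Set.add s v
      | none => s) PySem.Set.empty
    if PySem.Set.contains detected "Pothole" then "Pothole"
    else if PySem.Set.contains detected "Severe_Damage" then "Severe_Damage"
    else if PySem.Set.contains detected "Crack" then "Crack"
    else if PySem.Set.contains detected "Minor_Damage" then "Minor_Damage"
    else "Good"

-- ===== PORT B =====
def pvPriority : List String := ["Pothole", "Severe_Damage", "Crack"]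

-- does obj map to cls under CLASS_MAPPING?
def pvMapsTo (obj : List (String × String)) (cls : String) : Bool :=
  PySem.Dict.get? pvClassMapping (PySem.Dict.getD (PySem.Dict.mk obj) "classTitle" "") == some cls

def pvFirstPriority (objs : List (List (String × String))) : List String → String
  | [] => "Good"
  | cls :: rest => if objs.any (fun obj => pvMapsTo obj cls) then cls else pvFirstPriority objs rest

def get_image_class_alt (ann_data : List (String × List (List (String × String)))) : String :=
  let objs := (PySem.Dict.get? (PySem.Dict.mk ann_data) "objects").getD []
  pvFirstPriority objs pvPriority

-- ===== PRECONDITION & SPEC =====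
def Spec_get_image_class (ann_data : List (String × List (List (String × String)))) (out : String) : Prop := out = get_image_class_alt ann_data
instance (ann_data : List (String × List (List (String × String)))) (out : String) : Decidable (Spec_get_image_class ann_data out) := by unfold Spec_get_image_class; infer_instance

-- ===== CLAIM (what is proved, stated in full; the proofs are below) =====
def Claim_equal_get_image_class : Prop := ∀ (ann_data : List (String × List (List (String × String)))), Dom_get_image_class ann_data → Spec_get_image_class ann_data (get_image_class ann_data)

-- ===== LEMMAS AND PROOFS =====

-- the detected set of A contains x iff it is in the initial set or some object maps to x
theorem pv_mem_detected (objs : List (List (String × String))) (s : List String) (x : String) :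
    (x ∈ objs.foldl (fun s obj =>
      match PySem.Dict.get? pvClassMapping (PySem.Dict.getD (PySem.Dict.mk obj) "classTitle" "") with
      | some v => PySem.Set.add s v
      | none => s) s) ↔ x ∈ s ∨ ∃ obj ∈ objs, pvMapsTo obj x = true := by
  induction objs generalizing s with
  | nil => simp
  | cons o rest ih =>
    simp only [List.foldl_cons]
    rw [ih]
    rcases h : PySem.Dict.get? pvClassMapping (PySem.Dict.getD (PySem.Dict.mk o) "classTitle" "") with _ | v
    · simp only [pvMapsTo, List.mem_cons]
      constructor
      · rintro (hs | ⟨obj, hm, hx⟩)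
        · exact Or.inl hs
        · exact Or.inr ⟨obj, Or.inr hm, hx⟩
      · rintro (hs | ⟨obj, (rfl | hm), hx⟩)
        · exact Or.inl hs
        · simp [h] at hx
        · exact Or.inr ⟨obj, hm, hx⟩
    · simp only [pvMapsTo, PySem.Set.mem_add, List.mem_cons]
      constructor
      · rintro (⟨hs | rfl⟩ | ⟨obj, hm, hx⟩)
        · exact Or.inl hs
        · exact Or.inr ⟨o, Or.inl rfl, by simp [h]⟩
        · exact Or.inr ⟨obj, Or.inr hm, hx⟩
      · rintro (hs | ⟨obj, (rfl | hm), hx⟩)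
        · exact Or.inl (Or.inl hs)
        · simp [h] at hx
          exact Or.inl (Or.inr hx.symm)
        · exact Or.inr ⟨obj, hm, hx⟩

-- CLASS_MAPPING never yields "Minor_Damage"
theorem pv_no_minor (obj : List (String × String)) : pvMapsTo obj "Minor_Damage" = false := by
  simp only [pvMapsTo, pvClassMapping, PySem.Dict.get?_mk_cons]
  split_ifs <;> simp [PySem.Dict.get?]

theorem pv_contains_eq (objs : List (List (String × String))) (c : String) :
    PySem.Set.contains (objs.foldl (fun s obj =>
      match PySem.Dict.get? pvClassMapping (PySem.Dict.getD (PySem.Dict.mk obj) "classTitle" "") with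
      | some v => PySem.Set.add s v
      | none => s) PySem.Set.empty) c = objs.any (fun obj => pvMapsTo obj c) := by
  rw [Bool.eq_iff_iff]
  simp only [PySem.Set.contains, List.any_eq_true, List.contains_iff_mem, pv_mem_detected]
  simp [PySem.Set.empty]

theorem pv_main (objs : List (List (String × String))) :
    (if PySem.Set.contains (objs.foldl (fun s obj =>
        match PySem.Dict.get? pvClassMapping (PySem.Dict.getD (PySem.Dict.mk obj) "classTitle" "") with
        | some v => PySem.Set.add s v
        | none => s) PySem.Set.empty) "Pothole" then "Pothole"
     else if PySem.Set.contains (objs.foldl (fun s obj =>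
        match PySem.Dict.get? pvClassMapping (PySem.Dict.getD (PySem.Dict.mk obj) "classTitle" "") with
        | some v => PySem.Set.add s v
        | none => s) PySem.Set.empty) "Severe_Damage" then "Severe_Damage"
     else if PySem.Set.contains (objs.foldl (fun s obj =>
        match PySem.Dict.get? pvClassMapping (PySem.Dict.getD (PySem.Dict.mk obj) "classTitle" "") with
        | some v => PySem.Set.add s v
        | none => s) PySem.Set.empty) "Crack" then "Crack"
     else if PySem.Set.contains (objs.foldl (fun s obj =>
        match PySem.Dict.get? pvClassMapping (PySem.Dict.getD (PySem.Dict.mk obj) "classTitle" "") with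
        | some v => PySem.Set.add s v
        | none => s) PySem.Set.empty) "Minor_Damage" then "Minor_Damage"
     else "Good") = pvFirstPriority objs pvPriority := by
  simp only [pv_contains_eq, pvPriority, pvFirstPriority]
  have hm : objs.any (fun obj => pvMapsTo obj "Minor_Damage") = false := by
    simp [pv_no_minor]
  rw [hm]
  simp

-- ===== VERDICT (by name: the statement is the Claim_ definition above) =====
theorem get_image_class_spec : Claim_equal_get_image_class := by
  intro ann_data _
  unfold Spec_get_image_class get_image_class get_image_class_alt
  by_cases h : (PySem.Dict.get? (PySem.Dict.mk ann_data) "objects").getD [] = []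
  · simp [h, pvFirstPriority, pvPriority]
  · simp only [h, if_false]
    exact pv_main _
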